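-- pv_equiv track=rewrite | github.com/natelson/codes_python_interview | string_questions/extract_max_number_of_string.py | extract_max_number
-- ===== SOURCE A (Python) =====
-- def extract_max_number(string):
--     numbers = '0123456789'
--     list_numbers = []
--     temp_number = ''
--     for character in string:
--         if character in numbers:
--             temp_number += character
--         else:
--             if temp_number != '':
--                 list_numbers.append(int(temp_number))
--                 temp_number = ''
--
--     if temp_number != '':
--         list_numbers.append(int(temp_number))
--
--     if len(list_numbers) > 0:
--         return max(list_numbers)
--     else:
--         return -1
-- ===== SOURCE B (Python) =====
-- def extract_max_number(string):
--     # Translate every non-digit to a space, split into maximal digit runs, take the max.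
--     spaced = ''.join(c if '0' <= c <= '9' else ' ' for c in string)
--     values = [int(token) for token in spaced.split()]
--     return max(values) if values else -1
-- ===== Notes on version B (the rewrite author's own statement) =====
-- stated objective: idiomatic
-- what changed: Replaces the manual temp-string accumulator loop with its flush branches (in-loop and post-loop) by a translate-non-digits-to-space + str.split() pipeline over maximal digit runs, then max with a -1 fallback.
import Mathlib
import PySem

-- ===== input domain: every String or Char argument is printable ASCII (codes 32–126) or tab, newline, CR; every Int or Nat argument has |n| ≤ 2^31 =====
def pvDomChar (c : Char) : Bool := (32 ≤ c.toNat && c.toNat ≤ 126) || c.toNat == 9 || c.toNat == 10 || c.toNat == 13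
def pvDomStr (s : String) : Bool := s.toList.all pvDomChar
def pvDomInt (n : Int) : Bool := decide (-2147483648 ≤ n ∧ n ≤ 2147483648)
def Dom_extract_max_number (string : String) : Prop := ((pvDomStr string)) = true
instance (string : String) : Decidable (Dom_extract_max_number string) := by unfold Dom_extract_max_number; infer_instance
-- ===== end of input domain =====

-- B replaces A's manual temp-string accumulator loop by a translate-non-digits-to-space
-- + split() pipeline over maximal digit runs (idiomatic rewrite; same asymptotic cost).


-- ===== PORT A =====
-- int(temp) for a temp that is always a nonempty run of '0'..'9' digits here, where
-- PySem.Int.ofChars? is always `some`; .getD 0 only discharges the Option (exact).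
def pvIntOf (cs : List Char) : Int := (PySem.Int.ofChars? cs).getD 0

-- the loop body of A: state = (list_numbers, temp_number as chars)
def pvStepA (st : List Int × List Char) (character : Char) : List Int × List Char :=
  if ("0123456789".toList).contains character then
    (st.1, st.2 ++ [character])
  else
    if st.2 ≠ [] then (st.1 ++ [pvIntOf st.2], []) else (st.1, st.2)

def extract_max_number (string : String) : Int :=
  let st := string.toList.foldl pvStepA ([], [])
  let list_numbers := if st.2 ≠ [] then st.1 ++ [pvIntOf st.2] else st.1
  if list_numbers.length > 0 then
    (PySem.List.max? list_numbers (fun x => x)).getD (-1)   -- max(list_numbers); list nonempty here, so never the default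
  else
    -1

-- ===== PORT B =====
-- 'c if '0' <= c <= '9' else ' '' from Source B's join-comprehension
def pvToSp (c : Char) : Char := if decide ('0' ≤ c) && decide (c ≤ '9') then c else ' '

def extract_max_number_alt (string : String) : Int :=
  let spaced := string.toList.map pvToSp
  let values := (PySem.Chars.split₀ spaced).map (fun token => pvIntOf token)
  match values with
  | [] => -1
  | _ :: _ => (PySem.List.max? values (fun x => x)).getD (-1)   -- max(values); list nonempty, so never the default

-- ===== PRECONDITION & SPEC =====
def Spec_extract_max_number (string : String) (out : Int) : Prop := out = extract_max_number_alt string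
instance (string : String) (out : Int) : Decidable (Spec_extract_max_number string out) := by unfold Spec_extract_max_number; infer_instance

-- ===== CLAIM (what is proved, stated in full; the proofs are below) =====
def Claim_equal_extract_max_number : Prop := ∀ (string : String), Dom_extract_max_number string → Spec_extract_max_number string (extract_max_number string)

-- ===== LEMMAS AND PROOFS =====

-- A's membership test 'character in "0123456789"' is exactly the digit test of B
theorem pvContains_eq_isdigit (c : Char) :
    ("0123456789".toList).contains c = PySem.Chars.isdigit c := by
  have h : "0123456789".toList = ['0','1','2','3','4','5','6','7','8','9'] := rfl
  rw [h]
  by_cases hd : PySem.Chars.isdigit c = true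
  · rw [hd]
    simp only [PySem.Chars.isdigit, Bool.and_eq_true, decide_eq_true_eq] at hd
    have hn1 : 48 ≤ c.toNat := hd.1
    have hn2 : c.toNat ≤ 57 := hd.2
    interval_cases hn : c.toNat <;>
      (have hc := Char.ofNat_toNat c; rw [hn] at hc; rw [← hc]; decide)
  · rw [Bool.not_eq_true] at hd
    rw [hd]
    simp only [List.contains_eq_mem, decide_eq_false_iff_not, List.mem_cons,
      List.not_mem_nil, or_false]
    rintro (rfl|rfl|rfl|rfl|rfl|rfl|rfl|rfl|rfl|rfl) <;> simp [PySem.Chars.isdigit] at hd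

theorem pvToSp_digit (c : Char) (h : PySem.Chars.isdigit c = true) : pvToSp c = c := by
  simp only [PySem.Chars.isdigit] at h
  simp [pvToSp, h]

theorem pvToSp_nondigit (c : Char) (h : PySem.Chars.isdigit c = false) : pvToSp c = ' ' := by
  simp only [PySem.Chars.isdigit] at h
  simp [pvToSp, h]

theorem pvIsspace_of_digit (c : Char) (h : PySem.Chars.isdigit c = true) :
    PySem.Chars.isspace c = false := by
  simp only [PySem.Chars.isdigit, Bool.and_eq_true, decide_eq_true_eq] at h
  have hn1 : 48 ≤ c.toNat := h.1
  have hn2 : c.toNat ≤ 57 := h.2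
  simp only [PySem.Chars.isspace, Bool.or_eq_false_iff, Bool.and_eq_false_iff,
    decide_eq_false_iff_not]
  omega

-- split₀.go threads its accumulator as a reversed prefix of the output
theorem pvGo_acc (s : List Char) (cur : List Char) (acc : List (List Char)) :
    PySem.Chars.split₀.go s cur acc = acc.reverse ++ PySem.Chars.split₀.go s cur [] := by
  induction s generalizing cur acc with
  | nil =>
    simp only [PySem.Chars.split₀.go]
    split <;> simp
  | cons c rest ih =>
    simp only [PySem.Chars.split₀.go]
    split
    · split
      · exact ih [] acc
      · rw [ih [] (cur.reverse :: acc), ih [] [cur.reverse]]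
        simp
    · exact ih (c :: cur) acc

-- the flushed list_numbers of A's loop
def pvFlush (st : List Int × List Char) : List Int :=
  if st.2 ≠ [] then st.1 ++ [pvIntOf st.2] else st.1

-- invariant: A's loop (with pending nums/temp) produces exactly the int values of the
-- whitespace-split of the translated remainder, with temp as the open run
theorem pvMain (cs : List Char) : ∀ (nums : List Int) (temp : List Char),
    pvFlush (cs.foldl pvStepA (nums, temp)) =
      nums ++ (PySem.Chars.split₀.go (cs.map pvToSp) temp.reverse []).map pvIntOf := by
  induction cs with
  | nil =>
    intro nums temp
    simp only [List.foldl_nil, List.map_nil, PySem.Chars.split₀.go, pvFlush]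
    cases temp with
    | nil => simp
    | cons t ts => simp [List.isEmpty_iff]
  | cons c rest ih =>
    intro nums temp
    simp only [List.foldl_cons, List.map_cons, pvStepA, pvContains_eq_isdigit]
    by_cases hd : PySem.Chars.isdigit c = true
    · rw [hd]
      simp only [if_true, PySem.Chars.split₀.go, pvToSp_digit c hd, pvIsspace_of_digit c hd,
        Bool.false_eq_true, if_false]
      have : c :: temp.reverse = (temp ++ [c]).reverse := by simp
      rw [this]
      exact ih nums (temp ++ [c])
    · rw [Bool.not_eq_true] at hd
      rw [hd]
      simp only [Bool.false_eq_true, if_false, PySem.Chars.split₀.go, pvToSp_nondigit c hd,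
        show PySem.Chars.isspace ' ' = true from rfl, if_true]
      cases temp with
      | nil =>
        simp only [ne_eq, not_true_eq_false, if_false, List.reverse_nil, List.isEmpty_nil,
          if_true]
        exact ih nums []
      | cons t ts =>
        simp only [ne_eq, reduceCtorEq, not_false_eq_true, if_true, List.isEmpty_iff,
          List.reverse_eq_nil_iff, reduceCtorEq, if_false]
        rw [pvGo_acc _ [] [(t :: ts).reverse.reverse], ih (nums ++ [pvIntOf (t :: ts)]) []]
        simp

-- ===== VERDICT (by name: the statement is the Claim_ definition above) =====
theorem extract_max_number_spec : Claim_equal_extract_max_number := by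
  intro string _
  have h := pvMain string.toList [] []
  simp only [pvFlush, List.nil_append, List.reverse_nil] at h
  simp only [Spec_extract_max_number, extract_max_number, extract_max_number_alt,
    PySem.Chars.split₀]
  rw [← h]
  cases hL : (if (string.toList.foldl pvStepA ([], [])).2 ≠ [] then
      (string.toList.foldl pvStepA ([], [])).1 ++ [pvIntOf (string.toList.foldl pvStepA ([], [])).2]
    else (string.toList.foldl pvStepA ([], [])).1) with
  | nil => simp
  | cons v vs => simp
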